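-- pv_equiv track=rewrite | github.com/AdamWiatrowski/PK | Blum-Blum-Shub/main.py | count_series
-- ===== SOURCE A (Python) =====
-- def count_series(nb):
--     series = []
--     count = 0
--     for i in nb:
--         if i == "1":
--             count += 1
--         else:
--             if count > 0:
--                 series.append(count)
--                 count = 0
--     seria = {i + 1: 0 for i in range(6)}
--
--     for i in series:
--         if i == 1:
--             seria[1] += 1
--         elif i == 2:
--             seria[2] += 1
--         elif i == 3:
--             seria[3] += 1
--         elif i == 4:
--             seria[4] += 1
--         elif i == 5:
--             seria[5] += 1
--         else:
--             seria[6] += 1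
--
--     return seria
-- ===== SOURCE B (Python) =====
-- def count_series(nb):
--     seria = {i + 1: 0 for i in range(6)}
--     count = 0
--     for i in nb:
--         if i == "1":
--             count += 1
--         else:
--             if count > 0:
--                 seria[min(count, 6)] += 1
--                 count = 0
--     return seria
-- ===== Notes on version B (the rewrite author's own statement) =====
-- stated objective: simpler
-- what changed: Single pass that buckets each run directly into the pre-initialised dict via min(count, 6), eliminating the intermediate series list, the second loop and its six-way elif chain.
import Mathlib
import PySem

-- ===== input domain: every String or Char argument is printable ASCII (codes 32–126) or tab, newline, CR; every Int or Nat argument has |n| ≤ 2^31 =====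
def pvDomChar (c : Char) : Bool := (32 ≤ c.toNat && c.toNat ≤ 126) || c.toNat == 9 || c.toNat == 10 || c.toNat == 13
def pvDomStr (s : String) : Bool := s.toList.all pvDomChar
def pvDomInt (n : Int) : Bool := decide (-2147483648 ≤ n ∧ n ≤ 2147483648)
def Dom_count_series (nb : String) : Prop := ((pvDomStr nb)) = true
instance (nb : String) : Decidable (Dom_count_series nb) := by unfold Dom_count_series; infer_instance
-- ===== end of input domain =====

-- B replaces A's two passes (collect run lengths into a list, then bucket them with a
-- six-way elif chain) by one direct-accumulation pass bucketing each run via min(count, 6).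

-- ===== PORT A =====
-- the initial dict {i+1: 0 for i in range(6)}
def csInit : PySem.Dict Int Int :=
  (PySem.List.pyRange 0 6 1).foldl (fun d i => d.insert (i + 1) 0) PySem.Dict.empty

-- one step of A's first loop over nb: state = (series, count)
def csAStep (st : List Int × Int) (i : Char) : List Int × Int :=
  if i = '1' then (st.1, st.2 + 1)
  else if st.2 > 0 then (st.1 ++ [st.2], 0) else st

-- one step of A's second loop: the six-way elif chain over seria
def csBucket (d : PySem.Dict Int Int) (i : Int) : PySem.Dict Int Int :=
  if i = 1 then d.modify 1 0 (· + 1)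
  else if i = 2 then d.modify 2 0 (· + 1)
  else if i = 3 then d.modify 3 0 (· + 1)
  else if i = 4 then d.modify 4 0 (· + 1)
  else if i = 5 then d.modify 5 0 (· + 1)
  else d.modify 6 0 (· + 1)

def count_series (nb : String) : List (Int × Int) :=
  let series := (nb.toList.foldl csAStep ([], 0)).1
  (series.foldl csBucket csInit).items

-- ===== PORT B =====
-- one step of B's single loop: state = (seria, count)
def csBStep (st : PySem.Dict Int Int × Int) (i : Char) : PySem.Dict Int Int × Int :=
  if i = '1' then (st.1, st.2 + 1)
  else if st.2 > 0 then (st.1.modify (min st.2 6) 0 (· + 1), 0) else st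

def count_series_alt (nb : String) : List (Int × Int) :=
  (nb.toList.foldl csBStep (csInit, 0)).1.items

-- ===== PRECONDITION & SPEC =====
def Spec_count_series (nb : String) (out : List (Int × Int)) : Prop := out = count_series_alt nb
instance (nb : String) (out : List (Int × Int)) : Decidable (Spec_count_series nb out) := by unfold Spec_count_series; infer_instance

-- ===== CLAIM (what is proved, stated in full; the proofs are below) =====
def Claim_equal_count_series : Prop := ∀ (nb : String), Dom_count_series nb → Spec_count_series nb (count_series nb)

-- ===== LEMMAS AND PROOFS =====

-- A's elif chain equals B's min-bucketing for positive run lengths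
theorem csBucket_eq_min (d : PySem.Dict Int Int) (i : Int) (hi : 1 ≤ i) :
    csBucket d i = d.modify (min i 6) 0 (· + 1) := by
  unfold csBucket
  split_ifs with h1 h2 h3 h4 h5 <;>
    (congr 1; omega)

-- A's first loop: the series accumulator only appends
theorem csA_append (l : List Char) (s : List Int) (c : Int) :
    l.foldl csAStep (s, c) =
      (s ++ (l.foldl csAStep ([], c)).1, (l.foldl csAStep ([], c)).2) := by
  induction l generalizing s c with
  | nil => simp
  | cons x l ih =>
    simp only [List.foldl_cons]
    by_cases hx : x = '1'
    · simp only [csAStep, hx]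
      exact ih s (c + 1)
    · by_cases hc : c > 0
      · simp only [csAStep, if_neg hx, if_pos hc, List.nil_append]
        rw [ih (s ++ [c]) 0, ih [c] 0]
        simp
      · simp only [csAStep, if_neg hx, if_neg hc]
        exact ih s c

-- main invariant: B's fused loop computes A's bucketing of A's series
theorem cs_key (l : List Char) (d : PySem.Dict Int Int) (c : Int) (hc : 0 ≤ c) :
    (l.foldl csBStep (d, c)).1 = ((l.foldl csAStep ([], c)).1).foldl csBucket d := by
  induction l generalizing d c with
  | nil => simp
  | cons x l ih =>
    simp only [List.foldl_cons]
    by_cases hx : x = '1'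
    · simp only [csBStep, csAStep, hx]
      exact ih d (c + 1) (by omega)
    · by_cases hcp : c > 0
      · simp only [csBStep, csAStep, if_neg hx, if_pos hcp, List.nil_append]
        rw [csA_append l [c] 0, List.foldl_append]
        simp only [List.foldl_cons, List.foldl_nil]
        rw [csBucket_eq_min d c (by omega)]
        exact ih _ 0 le_rfl
      · simp only [csBStep, csAStep, if_neg hx, if_neg hcp]
        exact ih d c hc

-- ===== VERDICT (by name: the statement is the Claim_ definition above) =====
theorem count_series_spec : Claim_equal_count_series := by
  intro nb _
  unfold Spec_count_series count_series count_series_alt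
  rw [cs_key nb.toList csInit 0 le_rfl]
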